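-- pv_equiv track=rewrite | github.com/tuan-ld/AENLP-reproduce-results | Console_sik.py | extracted_labels
-- ===== SOURCE A (Python) =====
-- def extracted_labels(predicted_results, tokens):
--     result = predicted_results[0]
--     result = result[1:-1]
--     before = 0
--     q = -1
--     labels = []
--     entities = []
--     ordered_tokens = []
--     for re in result:
--         if re != 0:
--             if re != before:
--                 q = q + 1
--                 labels.append(q)
--             else:
--                 labels.append(q)
--         else:
--             labels.append(-1)
--
--         before = re
--
--     for i in range(q+1):
--         tok = ""
--         rea = 0
--         for label, token, resul in zip(labels, tokens, result):
--             if label == i: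
--                 tok = tok + " " + token
--                 rea = resul
--         ordered_tokens.append(tok)
--         entities.append(rea)
--     return q, labels, ordered_tokens, entities
-- ===== SOURCE B (Python) =====
-- def extracted_labels(predicted_results, tokens):
--     # Single pass: open a new bucket when a nonzero run starts; fill buckets in place.
--     result = predicted_results[0][1:-1]
--     before = 0
--     q = -1
--     labels = []
--     ordered_tokens = []
--     entities = []
--     j = 0
--     for re in result:
--         if re != 0:
--             if re != before:
--                 q += 1
--                 ordered_tokens.append("")
--                 entities.append(0)
--             labels.append(q)
--             if j < len(tokens):
--                 ordered_tokens[q] += " " + tokens[j]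
--                 entities[q] = re
--         else:
--             labels.append(-1)
--         before = re
--         j += 1
--     return q, labels, ordered_tokens, entities
-- ===== Notes on version B (the rewrite author's own statement) =====
-- stated objective: alternative
-- what changed: Replaces A's per-label rescan (for each group index i, re-zip labels/tokens/result and filter) with a single pass that opens a new bucket whenever a nonzero run starts and appends/overwrites into the current bucket in place.
import Mathlib
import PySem

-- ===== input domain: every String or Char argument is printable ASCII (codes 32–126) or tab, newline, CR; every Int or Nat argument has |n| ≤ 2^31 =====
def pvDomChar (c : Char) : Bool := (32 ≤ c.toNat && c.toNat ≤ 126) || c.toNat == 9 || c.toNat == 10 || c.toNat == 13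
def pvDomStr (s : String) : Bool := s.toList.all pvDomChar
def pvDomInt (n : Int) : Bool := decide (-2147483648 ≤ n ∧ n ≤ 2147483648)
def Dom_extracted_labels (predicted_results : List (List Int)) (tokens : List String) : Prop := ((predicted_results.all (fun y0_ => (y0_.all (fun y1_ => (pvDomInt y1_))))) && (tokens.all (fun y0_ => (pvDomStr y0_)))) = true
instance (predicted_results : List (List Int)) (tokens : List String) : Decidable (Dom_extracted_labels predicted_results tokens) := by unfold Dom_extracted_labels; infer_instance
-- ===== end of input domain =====

-- B replaces A's per-label rescan with a single pass that buckets tokens/results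
-- into the current group as it goes (objective: alternative single-pass algorithm).

-- ===== PORT A =====
-- first loop of A: state (before, q, labels)
def pvSeg (st : Int × Int × List Int) (re : Int) : Int × Int × List Int :=
  if re ≠ 0 then
    if re ≠ st.1 then (re, st.2.1 + 1, st.2.2 ++ [st.2.1 + 1])
    else (re, st.2.1, st.2.2 ++ [st.2.1])
  else (re, st.2.1, st.2.2 ++ [(-1 : Int)])

-- inner loop of A's second loop: 'for label, token, resul in zip(labels, tokens, result)'
def pvGather (i : Int) (labels : List Int) (tokens : List String) (result : List Int) : String × Int :=
  (labels.zip (tokens.zip result)).foldl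
    (fun tr p => if p.1 = i then (tr.1 ++ " " ++ p.2.1, p.2.2) else tr) ("", 0)

def extracted_labels (predicted_results : List (List Int)) (tokens : List String) : Int × List Int × List String × List Int :=
  match PySem.List.pyGet? predicted_results 0 with
  | none => (-1, [], [], [])   -- IndexError on predicted_results[0]; excluded by Pre_
  | some r0 =>
    let result := PySem.List.slice r0 (some 1) (some (-1))
    let s := result.foldl pvSeg (0, -1, [])
    let p := (PySem.List.pyRange 0 (s.2.1 + 1) 1).foldl
      (fun (acc : List String × List Int) i =>
        let g := pvGather i s.2.2 tokens result
        (acc.1 ++ [g.1], acc.2 ++ [g.2])) ([], [])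
    (s.2.1, s.2.2, p.1, p.2)

-- ===== PORT B =====
structure PvB where
  before : Int
  q : Int
  labels : List Int
  ot : List String
  ents : List Int
  j : Nat
  deriving Repr, DecidableEq

def pvStepB (tokens : List String) (st : PvB) (re : Int) : PvB :=
  if re ≠ 0 then
    let st1 := if re ≠ st.before then
        { st with q := st.q + 1, ot := st.ot ++ [""], ents := st.ents ++ [(0 : Int)] }
      else st
    let st2 := { st1 with labels := st1.labels ++ [st1.q] }
    let st3 := if st2.j < tokens.length then
        { st2 with ot := st2.ot.modify st2.q.toNat (fun s => s ++ " " ++ tokens.getD st2.j ""),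
                   ents := st2.ents.set st2.q.toNat re }
      else st2
    { st3 with before := re, j := st3.j + 1 }
  else
    { st with labels := st.labels ++ [(-1 : Int)], before := re, j := st.j + 1 }

def extracted_labels_alt (predicted_results : List (List Int)) (tokens : List String) : Int × List Int × List String × List Int :=
  match PySem.List.pyGet? predicted_results 0 with
  | none => (-1, [], [], [])   -- IndexError on predicted_results[0]; excluded by Pre_
  | some r0 =>
    let result := PySem.List.slice r0 (some 1) (some (-1))
    let st := result.foldl (pvStepB tokens) ⟨0, -1, [], [], [], 0⟩
    (st.q, st.labels, st.ot, st.ents)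

-- ===== PRECONDITION & SPEC =====
-- A raises IndexError on predicted_results[0] when the list is empty (B does too).
def Pre_extracted_labels (predicted_results : List (List Int)) (tokens : List String) : Prop :=
  predicted_results ≠ []
instance (predicted_results : List (List Int)) (tokens : List String) : Decidable (Pre_extracted_labels predicted_results tokens) := by unfold Pre_extracted_labels; infer_instance

def pvWitness_extracted_labels : List (List Int) × List String :=
  ([[9, 0, 1, 1, 0, 2, 7]], ["a", "bc", "d", "e"])

def Spec_extracted_labels (predicted_results : List (List Int)) (tokens : List String) (out : Int × List Int × List String × List Int) : Prop := out = extracted_labels_alt predicted_results tokens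
instance (predicted_results : List (List Int)) (tokens : List String) (out : Int × List Int × List String × List Int) : Decidable (Spec_extracted_labels predicted_results tokens out) := by unfold Spec_extracted_labels; infer_instance

-- ===== CLAIM (what is proved, stated in full; the proofs are below) =====
def Claim_equal_extracted_labels : Prop := ∀ (predicted_results : List (List Int)) (tokens : List String), Dom_extracted_labels predicted_results tokens → Pre_extracted_labels predicted_results tokens → Spec_extracted_labels predicted_results tokens (extracted_labels predicted_results tokens)

-- ===== LEMMAS AND PROOFS =====

-- generic fold of paired appends = pair of maps
theorem pv_foldl_pairs (g : Int → String × Int) :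
    ∀ (xs : List Int) (a : List String) (b : List Int),
      xs.foldl (fun (acc : List String × List Int) i =>
        (acc.1 ++ [(g i).1], acc.2 ++ [(g i).2])) (a, b)
      = (a ++ xs.map (fun i => (g i).1), b ++ xs.map (fun i => (g i).2)) := by
  intro xs
  induction xs with
  | nil => simp
  | cons x xs ih => intro a b; simp [List.foldl_cons, ih]

theorem pv_zip_snoc {α β : Type} :
    ∀ (xs : List α) (x : α) (ys : List β),
      (xs ++ [x]).zip ys
        = xs.zip ys ++ ((ys[xs.length]?).map (fun y => (x, y))).toList := by
  intro xs
  induction xs with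
  | nil => intro x ys; cases ys <;> simp
  | cons a xs ih =>
    intro x ys
    cases ys with
    | nil => simp
    | cons y ys => simp [ih]

theorem pv_getElem?_zip {α β : Type} :
    ∀ (as : List α) (bs : List β) (i : Nat),
      (as.zip bs)[i]? = as[i]?.bind (fun a => bs[i]?.map (fun b => (a, b))) := by
  intro as
  induction as with
  | nil => intro bs i; simp
  | cons a as ih =>
    intro bs i
    cases bs with
    | nil => simp
    | cons b bs => cases i with
      | zero => simp
      | succ n => simpa using ih bs n

-- a gather over labels none of which equal i is the initial state
theorem pv_gather_fresh (i : Int) (labels : List Int) (tokens : List String)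
    (result : List Int) (h : ∀ l ∈ labels, l ≠ i) :
    pvGather i labels tokens result = ("", 0) := by
  unfold pvGather
  have : ∀ (L : List (Int × String × Int)),
      (∀ p ∈ L, p.1 ≠ i) →
      L.foldl (fun (tr : String × Int) p =>
        if p.1 = i then (tr.1 ++ " " ++ p.2.1, p.2.2) else tr) ("", 0) = ("", 0) := by
    intro L
    induction L with
    | nil => intro _; simp
    | cons p L ih =>
      intro hp
      have h1 : ¬ p.1 = i := hp p (by simp)
      simp only [List.foldl_cons, if_neg h1]
      exact ih (fun r hr => hp r (by simp [hr]))
  refine this _ ?_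
  intro p hp
  obtain ⟨hl, _⟩ := List.of_mem_zip (a := p.1) (b := p.2) (by simpa using hp)
  exact h _ hl

-- extending labels by one element changes gather exactly as B's step does
theorem pv_gather_snoc (i l re : Int) (labels : List Int) (tokens : List String)
    (result : List Int) (hres : result[labels.length]? = some re) :
    pvGather i (labels ++ [l]) tokens result =
      if labels.length < tokens.length then
        (if l = i then
          ((pvGather i labels tokens result).1 ++ " " ++ tokens.getD labels.length "", re)
        else pvGather i labels tokens result)
      else pvGather i labels tokens result := by
  unfold pvGather
  rw [pv_zip_snoc]
  rw [pv_getElem?_zip]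
  by_cases hj : labels.length < tokens.length
  · have ht : tokens[labels.length]? = some (tokens[labels.length]'hj) :=
      List.getElem?_eq_getElem hj
    simp only [ht, hres, Option.bind_some, Option.map_some, Option.toList_some,
      List.foldl_append, List.foldl_cons, List.foldl_nil, if_pos hj]
    by_cases hli : l = i
    · simp [hli, List.getD_eq_getElem?_getD, ht]
    · simp [hli]
  · have ht : tokens[labels.length]? = none := by
      simp only [List.getElem?_eq_none_iff]; omega
    simp [hj]

-- the main invariant: B's fold tracks A's first fold and keeps the buckets equal
-- to A's gathers over the labels built so far
theorem pv_main (tokens : List String) (result : List Int) :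
    ∀ (rs : List Int) (st : PvB),
      result.drop st.labels.length = rs →
      st.j = st.labels.length →
      (st.before ≠ 0 → 0 ≤ st.q) →
      -1 ≤ st.q →
      (∀ l ∈ st.labels, l < st.q + 1) →
      st.ot.length = (st.q + 1).toNat →
      st.ents.length = (st.q + 1).toNat →
      (∀ k : Nat, k < (st.q + 1).toNat →
        st.ot[k]? = some (pvGather (k : Int) st.labels tokens result).1 ∧
        st.ents[k]? = some (pvGather (k : Int) st.labels tokens result).2) →
      (let fin := rs.foldl (pvStepB tokens) st
       let finA := rs.foldl pvSeg (st.before, st.q, st.labels)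
       fin.q = finA.2.1 ∧ fin.labels = finA.2.2 ∧
       -1 ≤ fin.q ∧
       fin.ot.length = (fin.q + 1).toNat ∧ fin.ents.length = (fin.q + 1).toNat ∧
       (∀ k : Nat, k < (fin.q + 1).toNat →
         fin.ot[k]? = some (pvGather (k : Int) fin.labels tokens result).1 ∧
         fin.ents[k]? = some (pvGather (k : Int) fin.labels tokens result).2)) := by
  intro rs
  induction rs with
  | nil =>
    intro st h1 h2 hbq h4 h5 h6 h7 h8
    exact ⟨rfl, rfl, h4, h6, h7, h8⟩
  | cons re rs ih =>
    intro st h1 h2 hbq h4 h5 h6 h7 h8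
    have hres : result[st.labels.length]? = some re := by
      have h0 : (result.drop st.labels.length)[0]? = some re := by rw [h1]; rfl
      simpa using h0
    have hdrop' : result.drop (st.labels.length + 1) = rs := by
      rw [← List.tail_drop, h1]; rfl
    dsimp only
    simp only [List.foldl_cons]
    by_cases hre : re = 0
    · -- zero label: append -1, buckets untouched
      subst hre
      have hstep : pvStepB tokens st 0 =
          { st with labels := st.labels ++ [(-1 : Int)], before := 0, j := st.j + 1 } := by
        simp [pvStepB]
      have hseg : pvSeg (st.before, st.q, st.labels) 0 = (0, st.q, st.labels ++ [(-1 : Int)]) := by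
        simp [pvSeg]
      rw [hstep, hseg]
      have geq : ∀ k : Nat,
          pvGather (k : Int) (st.labels ++ [(-1 : Int)]) tokens result
            = pvGather (k : Int) st.labels tokens result := by
        intro k
        rw [pv_gather_snoc _ _ 0 _ _ _ hres]
        have hneg : ((-1 : Int) = (k : Int)) = False := by simp
        simp [hneg]
      have hb' : ∀ l ∈ st.labels ++ [(-1 : Int)], l < st.q + 1 := by
        intro l hl
        rcases List.mem_append.1 hl with hl | hl
        · exact h5 l hl
        · simp at hl; omega
      have hpt' : ∀ k : Nat, k < (st.q + 1).toNat →
          st.ot[k]? = some (pvGather (k : Int) (st.labels ++ [(-1 : Int)]) tokens result).1 ∧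
          st.ents[k]? = some (pvGather (k : Int) (st.labels ++ [(-1 : Int)]) tokens result).2 := by
        intro k hk; rw [geq k]; exact h8 k hk
      exact ih _ (by simpa using hdrop') (by simp [h2]) (fun h => absurd rfl h) h4 hb' h6 h7 hpt'
    · by_cases hnb : re = st.before
      · -- continuing group: label = q (q ≥ 0), current bucket extended in place
        have hq0 : 0 ≤ st.q := hbq (by rw [← hnb]; exact hre)
        have geq : ∀ k : Nat,
            pvGather (k : Int) (st.labels ++ [st.q]) tokens result
              = if st.labels.length < tokens.length then
                  (if st.q = (k : Int) then
                    ((pvGather (k : Int) st.labels tokens result).1 ++ " " ++ tokens.getD st.labels.length "", re)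
                  else pvGather (k : Int) st.labels tokens result)
                else pvGather (k : Int) st.labels tokens result := fun k =>
          pv_gather_snoc _ _ re _ _ _ hres
        have hseg : pvSeg (st.before, st.q, st.labels) re = (re, st.q, st.labels ++ [st.q]) := by
          rw [pvSeg]
          rw [if_pos hre, if_neg (not_not_intro hnb)]
        have hb' : ∀ l ∈ st.labels ++ [st.q], l < st.q + 1 := by
          intro l hl
          rcases List.mem_append.1 hl with hl | hl
          · exact h5 l hl
          · simp at hl; omega
        rw [hseg]
        by_cases hjt : st.j < tokens.length
        · have hstep : pvStepB tokens st re =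
              { st with labels := st.labels ++ [st.q],
                        ot := st.ot.modify st.q.toNat (fun s => s ++ " " ++ tokens.getD st.j ""),
                        ents := st.ents.set st.q.toNat re,
                        before := re, j := st.j + 1 } := by
            rw [pvStepB]
            rw [if_pos hre, if_neg (not_not_intro hnb)]
            dsimp only
            rw [if_pos hjt]
          rw [hstep]
          have hpt' : ∀ k : Nat, k < (st.q + 1).toNat →
              (st.ot.modify st.q.toNat (fun s => s ++ " " ++ tokens.getD st.j ""))[k]?
                = some (pvGather (k : Int) (st.labels ++ [st.q]) tokens result).1 ∧
              (st.ents.set st.q.toNat re)[k]?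
                = some (pvGather (k : Int) (st.labels ++ [st.q]) tokens result).2 := by
            intro k hk
            rw [geq k, if_pos (by omega : st.labels.length < tokens.length)]
            have hot := (h8 k hk).1
            have hent := (h8 k hk).2
            by_cases hkq : st.q = (k : Int)
            · have hknat : st.q.toNat = k := by omega
              constructor
              · rw [List.getElem?_modify, hot]
                simp [hkq, h2]
              · rw [List.getElem?_set, if_pos hknat, if_pos (by omega : st.q.toNat < st.ents.length)]
                simp [hkq]
            · have hknat : ¬ st.q.toNat = k := by omega
              constructor
              · rw [List.getElem?_modify, hot]
                simp [hkq, hknat]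
              · rw [List.getElem?_set, if_neg hknat, hent]
                simp [hkq]
          exact ih _ (by simpa using hdrop') (by simp [h2]) (fun _ => hq0) h4 hb'
            (by simpa using h6) (by simpa using h7) hpt'
        · have hstep : pvStepB tokens st re =
              { st with labels := st.labels ++ [st.q], before := re, j := st.j + 1 } := by
            rw [pvStepB]
            rw [if_pos hre, if_neg (not_not_intro hnb)]
            dsimp only
            rw [if_neg hjt]
          rw [hstep]
          have hpt' : ∀ k : Nat, k < (st.q + 1).toNat →
              st.ot[k]? = some (pvGather (k : Int) (st.labels ++ [st.q]) tokens result).1 ∧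
              st.ents[k]? = some (pvGather (k : Int) (st.labels ++ [st.q]) tokens result).2 := by
            intro k hk
            rw [geq k, if_neg (by omega : ¬ st.labels.length < tokens.length)]
            exact h8 k hk
          exact ih _ (by simpa using hdrop') (by simp [h2]) (fun _ => hq0) h4 hb' h6 h7 hpt'
      · -- new group: open bucket q+1 (empty so far), then maybe put the token in it
        have hfresh : pvGather (st.q + 1) st.labels tokens result = ("", 0) :=
          pv_gather_fresh _ _ _ _ (fun l hl => by have := h5 l hl; omega)
        have geq : ∀ k : Nat,
            pvGather (k : Int) (st.labels ++ [st.q + 1]) tokens result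
              = if st.labels.length < tokens.length then
                  (if st.q + 1 = (k : Int) then
                    ((pvGather (k : Int) st.labels tokens result).1 ++ " " ++ tokens.getD st.labels.length "", re)
                  else pvGather (k : Int) st.labels tokens result)
                else pvGather (k : Int) st.labels tokens result := fun k =>
          pv_gather_snoc _ _ re _ _ _ hres
        have hseg : pvSeg (st.before, st.q, st.labels) re = (re, st.q + 1, st.labels ++ [st.q + 1]) := by
          rw [pvSeg]
          rw [if_pos hre, if_pos hnb]
        have hb' : ∀ l ∈ st.labels ++ [st.q + 1], l < st.q + 1 + 1 := by
          intro l hl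
          rcases List.mem_append.1 hl with hl | hl
          · have := h5 l hl; omega
          · simp at hl; omega
        have hlen1 : (st.ot ++ [""]).length = (st.q + 1 + 1).toNat := by
          simp [h6]; omega
        have hlen2 : (st.ents ++ [(0 : Int)]).length = (st.q + 1 + 1).toNat := by
          simp [h7]; omega
        rw [hseg]
        by_cases hjt : st.j < tokens.length
        · have hstep : pvStepB tokens st re =
              { st with q := st.q + 1, labels := st.labels ++ [st.q + 1],
                        ot := (st.ot ++ [""]).modify (st.q + 1).toNat (fun s => s ++ " " ++ tokens.getD st.j ""),
                        ents := (st.ents ++ [(0 : Int)]).set (st.q + 1).toNat re,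
                        before := re, j := st.j + 1 } := by
            rw [pvStepB]
            rw [if_pos hre, if_pos hnb]
            dsimp only
            rw [if_pos hjt]
          rw [hstep]
          have hpt' : ∀ k : Nat, k < (st.q + 1 + 1).toNat →
              ((st.ot ++ [""]).modify (st.q + 1).toNat (fun s => s ++ " " ++ tokens.getD st.j ""))[k]?
                = some (pvGather (k : Int) (st.labels ++ [st.q + 1]) tokens result).1 ∧
              ((st.ents ++ [(0 : Int)]).set (st.q + 1).toNat re)[k]?
                = some (pvGather (k : Int) (st.labels ++ [st.q + 1]) tokens result).2 := by
            intro k hk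
            rw [geq k, if_pos (by omega : st.labels.length < tokens.length)]
            by_cases hkq : st.q + 1 = (k : Int)
            · have hknat : (st.q + 1).toNat = k := by omega
              have hkot : k = st.ot.length := by omega
              have hkq' : pvGather (k : Int) st.labels tokens result = ("", 0) := by
                rw [← hkq]; exact hfresh
              constructor
              · rw [List.getElem?_modify]
                rw [hkot, List.getElem?_concat_length]
                simp [hkq, ← hkot, hkq', h2]
              · rw [List.getElem?_set, if_pos hknat,
                  if_pos (by rw [hlen2]; omega : (st.q + 1).toNat < (st.ents ++ [(0 : Int)]).length)]
                simp [hkq]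
            · have hknat : ¬ (st.q + 1).toNat = k := by omega
              have hklt : k < st.ot.length := by omega
              have hklt2 : k < st.ents.length := by omega
              have hot := (h8 k (by omega)).1
              have hent := (h8 k (by omega)).2
              constructor
              · rw [List.getElem?_modify, List.getElem?_append_left hklt, hot]
                simp [hkq, hknat]
              · rw [List.getElem?_set, if_neg hknat, List.getElem?_append_left hklt2, hent]
                simp [hkq]
          exact ih _ (by simpa using hdrop') (by simp [h2])
            (fun _ => by show (0 : Int) ≤ st.q + 1; omega) (by show (-1 : Int) ≤ st.q + 1; omega) hb'
            (by simpa using hlen1) (by simpa using hlen2) hpt'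
        · have hstep : pvStepB tokens st re =
              { st with q := st.q + 1, labels := st.labels ++ [st.q + 1],
                        ot := st.ot ++ [""], ents := st.ents ++ [(0 : Int)],
                        before := re, j := st.j + 1 } := by
            rw [pvStepB]
            rw [if_pos hre, if_pos hnb]
            dsimp only
            rw [if_neg hjt]
          rw [hstep]
          have hpt' : ∀ k : Nat, k < (st.q + 1 + 1).toNat →
              (st.ot ++ [""])[k]? = some (pvGather (k : Int) (st.labels ++ [st.q + 1]) tokens result).1 ∧
              (st.ents ++ [(0 : Int)])[k]? = some (pvGather (k : Int) (st.labels ++ [st.q + 1]) tokens result).2 := by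
            intro k hk
            rw [geq k, if_neg (by omega : ¬ st.labels.length < tokens.length)]
            by_cases hkq : st.q + 1 = (k : Int)
            · have hkot : k = st.ot.length := by omega
              have hkent : k = st.ents.length := by omega
              have hkq' : pvGather (k : Int) st.labels tokens result = ("", 0) := by
                rw [← hkq]; exact hfresh
              constructor
              · rw [hkq', hkot, List.getElem?_concat_length]
              · rw [hkq', hkent, List.getElem?_concat_length]
            · have hklt : k < st.ot.length := by omega
              have hklt2 : k < st.ents.length := by omega
              rw [List.getElem?_append_left hklt, List.getElem?_append_left hklt2]
              exact h8 k (by omega)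
          exact ih _ (by simpa using hdrop') (by simp [h2])
            (fun _ => by show (0 : Int) ≤ st.q + 1; omega) (by show (-1 : Int) ≤ st.q + 1; omega) hb'
            hlen1 hlen2 hpt'

theorem pv_core (tokens : List String) (result : List Int) :
    (let st := result.foldl (pvStepB tokens) ⟨0, -1, [], [], [], 0⟩
     let s := result.foldl pvSeg (0, -1, [])
     let p := (PySem.List.pyRange 0 (s.2.1 + 1) 1).foldl
       (fun (acc : List String × List Int) i =>
         let g := pvGather i s.2.2 tokens result
         (acc.1 ++ [g.1], acc.2 ++ [g.2])) ([], [])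
     (s.2.1, s.2.2, p.1, p.2) = (st.q, st.labels, st.ot, st.ents)) := by
  have main := pv_main tokens result result ⟨0, -1, [], [], [], 0⟩
    (by simp) rfl (fun h => absurd rfl h) (by norm_num) (by simp)
    (by simp) (by simp) (by intro k hk; simp at hk)
  obtain ⟨hq, hl, hqge, hlen1, hlen2, hpt⟩ := main
  dsimp only at hq hl hqge hlen1 hlen2 hpt ⊢
  rw [pv_foldl_pairs (fun i => pvGather i (result.foldl pvSeg (0, -1, [])).2.2 tokens result)]
  simp only [List.nil_append, Prod.mk.injEq]
  rw [← hq, ← hl]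
  refine ⟨rfl, rfl, ?_, ?_⟩
  · -- ordered_tokens
    apply List.ext_getElem?
    intro i
    rw [PySem.List.pyRange_one, List.map_map, List.getElem?_map]
    by_cases hi : i < ((result.foldl (pvStepB tokens) ⟨0, -1, [], [], [], 0⟩).q + 1 - 0).toNat
    · rw [List.getElem?_range hi]
      have := (hpt i (by omega)).1
      simp [this]
    · rw [List.getElem?_eq_none (by simp only [List.length_range]; omega),
        List.getElem?_eq_none (by omega)]
      rfl
  · -- entities
    apply List.ext_getElem?
    intro i
    rw [PySem.List.pyRange_one, List.map_map, List.getElem?_map]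
    by_cases hi : i < ((result.foldl (pvStepB tokens) ⟨0, -1, [], [], [], 0⟩).q + 1 - 0).toNat
    · rw [List.getElem?_range hi]
      have := (hpt i (by omega)).2
      simp [this]
    · rw [List.getElem?_eq_none (by simp only [List.length_range]; omega),
        List.getElem?_eq_none (by omega)]
      rfl

-- ===== VERDICT (by name: the statement is the Claim_ definition above) =====
theorem extracted_labels_spec : Claim_equal_extracted_labels := by
  intro pr tokens _ hpre
  unfold Spec_extracted_labels extracted_labels extracted_labels_alt
  match pr, hpre with
  | r0 :: rest, _ =>
    simp only [PySem.List.pyGet?_zero_cons]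
    exact pv_core tokens (PySem.List.slice r0 (some 1) (some (-1)))
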